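-- pv_equiv track=rewrite | github.com/teancom/sendspin-aiosendspin | scripts/benchmark_clients.py | _distribute_clients
-- ===== SOURCE A (Python) =====
-- def _distribute_clients(total: int, workers: int) -> list[tuple[int, int]]:
--     """Distribute clients across workers. Returns list of (start_index, count)."""
--     if workers <= 0:
--         return [(0, total)]
--     base_count = total // workers
--     remainder = total % workers
--     result: list[tuple[int, int]] = []
--     start = 0
--     for i in range(workers):
--         count = base_count + (1 if i < remainder else 0)
--         result.append((start, count))
--         start += count
--     return result
-- ===== SOURCE B (Python) =====
-- def _distribute_clients(total: int, workers: int) -> list[tuple[int, int]]: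
--     """Distribute clients across workers. Returns list of (start_index, count)."""
--     if workers <= 0:
--         return [(0, total)]
--     base, rem = divmod(total, workers)
--     return [(i * base + min(i, rem), base + (1 if i < rem else 0))
--             for i in range(workers)]
-- ===== Notes on version B (the rewrite author's own statement) =====
-- stated objective: alternative
-- what changed: Replaces the loop that threads a running `start` accumulator with a stateless comprehension computing each worker's start in closed form as i*base + min(i, remainder).
import Mathlib
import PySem

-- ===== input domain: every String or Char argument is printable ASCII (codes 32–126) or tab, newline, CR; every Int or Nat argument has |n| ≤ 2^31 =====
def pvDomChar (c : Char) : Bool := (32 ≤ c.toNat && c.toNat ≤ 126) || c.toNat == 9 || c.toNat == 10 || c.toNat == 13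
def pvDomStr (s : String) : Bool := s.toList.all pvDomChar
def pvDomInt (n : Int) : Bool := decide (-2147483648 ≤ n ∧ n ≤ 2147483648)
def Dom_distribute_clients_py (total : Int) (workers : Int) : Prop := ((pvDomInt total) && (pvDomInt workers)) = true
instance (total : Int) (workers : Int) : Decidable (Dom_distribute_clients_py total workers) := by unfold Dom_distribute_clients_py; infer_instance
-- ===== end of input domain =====

-- B replaces A's loop-carried `start` accumulator with a stateless closed-form
-- start i*base + min(i, remainder) per worker (objective: alternative decomposition).

-- ===== PORT A =====
def distribute_clients_py (total : Int) (workers : Int) : List (Int × Int) :=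
  if workers ≤ 0 then [(0, total)]
  else
    let base_count := PySem.Int.floordiv total workers
    let remainder := PySem.Int.mod total workers
    let st := (PySem.List.pyRange 0 workers 1).foldl
      (fun (s : List (Int × Int) × Int) i =>
        let count := base_count + (if i < remainder then 1 else 0)
        (s.1 ++ [(s.2, count)], s.2 + count)) ([], 0)
    st.1

-- ===== PORT B =====
def distribute_clients_py_alt (total : Int) (workers : Int) : List (Int × Int) :=
  if workers ≤ 0 then [(0, total)]
  else
    let base := PySem.Int.floordiv total workers
    let rem := PySem.Int.mod total workers
    (PySem.List.pyRange 0 workers 1).map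
      (fun i => (i * base + min i rem, base + (if i < rem then 1 else 0)))

-- ===== PRECONDITION & SPEC =====
def Spec_distribute_clients_py (total : Int) (workers : Int) (out : List (Int × Int)) : Prop := out = distribute_clients_py_alt total workers
instance (total : Int) (workers : Int) (out : List (Int × Int)) : Decidable (Spec_distribute_clients_py total workers out) := by unfold Spec_distribute_clients_py; infer_instance

-- ===== CLAIM (what is proved, stated in full; the proofs are below) =====
def Claim_equal_distribute_clients_py : Prop := ∀ (total : Int) (workers : Int), Dom_distribute_clients_py total workers → Spec_distribute_clients_py total workers (distribute_clients_py total workers)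

-- ===== LEMMAS AND PROOFS =====

-- Loop invariant: after the first n iterations, A's result list is B's map over
-- range(n) and A's running `start` equals the closed form n*base + min n rem.
theorem fold_invariant (base rem : Int) (hrem : 0 ≤ rem) (n : Nat) :
    ((PySem.List.pyRange 0 n 1).foldl
      (fun (s : List (Int × Int) × Int) i =>
        (s.1 ++ [(s.2, base + (if i < rem then 1 else 0))],
         s.2 + (base + (if i < rem then 1 else 0)))) ([], 0)) =
    ((PySem.List.pyRange 0 n 1).map
      (fun i => (i * base + min i rem, base + (if i < rem then 1 else 0))),
     (n : Int) * base + min (n : Int) rem) := by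
  induction n with
  | zero => simp; omega
  | succ n ih =>
    have h : ((n : Int) + 1) = ((n + 1 : Nat) : Int) := by push_cast; ring
    rw [← h, PySem.List.pyRange_one_succ_right (by positivity)]
    rw [List.foldl_append, ih, List.map_append]
    simp only [List.foldl_cons, List.foldl_nil, List.map_cons, List.map_nil]
    rw [Prod.mk.injEq]
    refine ⟨rfl, ?_⟩
    by_cases hc : (n : Int) < rem
    · simp only [hc, if_pos]
      have h1 : min (n : Int) rem = n := by omega
      have h2 : min ((n : Int) + 1) rem = (n : Int) + 1 := by omega
      rw [h1, h2]; ring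
    · simp only [hc, if_neg, not_false_iff]
      have h1 : min (n : Int) rem = rem := by omega
      have h2 : min ((n : Int) + 1) rem = rem := by omega
      rw [h1, h2]; ring

-- ===== VERDICT (by name: the statement is the Claim_ definition above) =====
theorem distribute_clients_py_spec : Claim_equal_distribute_clients_py := by
  intro total workers _
  unfold Spec_distribute_clients_py distribute_clients_py distribute_clients_py_alt
  by_cases hw : workers ≤ 0
  · simp [hw]
  · simp only [hw, if_neg, not_false_iff]
    have hpos : 0 < workers := by omega
    have hrem : 0 ≤ PySem.Int.mod total workers := PySem.Int.mod_nonneg _ hpos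
    have hn : workers = ((workers.toNat : Nat) : Int) := by omega
    rw [hn] at hrem ⊢
    rw [fold_invariant _ _ hrem]
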